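-- pv_equiv track=rewrite | github.com/difficultHarith/word-wheel-finder | main.py | check_letters
-- ===== SOURCE A (Python) =====
-- requiredLetter = "l"
--
-- OPTIONAL4 = "baumcane"
--
-- def check_letters(string):
--     OPTIONAL = list(OPTIONAL4)
--     REQUIRED = [requiredLetter]
--     REQUIRED2 = [requiredLetter]
--
--     """ Checks whether a word is ONLY made up from the valid letter set """
--     string = string.strip()
--
--     if len(string) < 4:
--         return False
--
--     for let in string:
--         # check each let(ter) of string against the lists
--         if let not in OPTIONAL + REQUIRED:
--             return False
--         else:
--             if let in OPTIONAL:
--                 OPTIONAL.remove(let)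
--             else:
--                 REQUIRED.remove(let)
--
--
--     for let in REQUIRED2:
--         # check the WORD against REQUIRED
--         if let not in string:
--             return False
--         else:
--             REQUIRED2.remove(let)
--
--     return True
-- ===== SOURCE B (Python) =====
-- requiredLetter = "l"
--
-- OPTIONAL4 = "baumcane"
--
-- def check_letters(string):
--     """ Checks whether a word is ONLY made up from the valid letter set """
--     s = string.strip()
--     if len(s) < 4:
--         return False
--     if requiredLetter not in s:
--         return False
--     allowed = OPTIONAL4 + requiredLetter
--     return all(s.count(c) <= allowed.count(c) for c in set(s))
-- ===== Notes on version B (the rewrite author's own statement) =====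
-- stated objective: simpler
-- what changed: Replaces A's incremental scan that mutates and removes from allowed-letter lists per character with a single aggregate comparison: count each distinct letter of the word once and check it does not exceed its multiplicity in the fixed allowed string.
import Mathlib
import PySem

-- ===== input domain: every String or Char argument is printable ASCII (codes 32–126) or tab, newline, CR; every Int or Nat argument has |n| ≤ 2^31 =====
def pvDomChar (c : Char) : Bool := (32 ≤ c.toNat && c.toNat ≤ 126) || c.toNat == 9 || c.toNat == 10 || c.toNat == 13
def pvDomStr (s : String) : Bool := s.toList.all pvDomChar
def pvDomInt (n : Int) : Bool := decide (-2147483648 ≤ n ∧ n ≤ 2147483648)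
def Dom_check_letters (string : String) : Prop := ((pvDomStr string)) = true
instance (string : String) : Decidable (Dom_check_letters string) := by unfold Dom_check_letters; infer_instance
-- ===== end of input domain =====

-- B replaces A's mutating scan-and-remove over the allowed-letter lists with one aggregate
-- comparison of letter counts against the fixed allowed multiset (objective: simpler).

-- ===== PORT A =====
-- the per-character loop: removal of a present element from a Python list is List.erase
def clScan : List Char → List Char → List Char → Bool
  | [], _, _ => true
  | c :: rest, OPT, REQ =>
    if c ∈ OPT ++ REQ then
      if c ∈ OPT then clScan rest (OPT.erase c) REQ
      else clScan rest OPT (REQ.erase c)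
    else false

def check_letters (string : String) : Bool :=
  let OPTIONAL : List Char := "baumcane".toList
  let REQUIRED : List Char := ['l']
  let s := (PySem.Str.strip string).toList
  if s.length < 4 then false
  else if clScan s OPTIONAL REQUIRED then
    -- second loop: 'for let in REQUIRED2' over the singleton ['l'] with the mid-loop
    -- remove visits exactly 'l'; exact for a one-element list
    if 'l' ∈ s then true else false
  else false

-- ===== PORT B =====
def check_letters_alt (string : String) : Bool :=
  let s := (PySem.Str.strip string).toList
  if s.length < 4 then false
  else if 'l' ∉ s then false
  else
    -- allowed = OPTIONAL4 + requiredLetter (string concatenation, ported on toList)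
    let allowed : List Char := "baumcane".toList ++ "l".toList
    (PySem.Set.ofList s).all (fun c => decide (s.count c ≤ allowed.count c))

-- ===== PRECONDITION & SPEC =====
def Spec_check_letters (string : String) (out : Bool) : Prop := out = check_letters_alt string
instance (string : String) (out : Bool) : Decidable (Spec_check_letters string out) := by unfold Spec_check_letters; infer_instance

-- ===== CLAIM (what is proved, stated in full; the proofs are below) =====
def Claim_equal_check_letters : Prop := ∀ (string : String), Dom_check_letters string → Spec_check_letters string (check_letters string)

-- ===== LEMMAS AND PROOFS =====

-- A's destructive scan succeeds iff no letter is used more often than the pool provides.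
theorem clScan_iff (cs : List Char) : ∀ (OPT REQ : List Char),
    clScan cs OPT REQ = true ↔ ∀ c, cs.count c ≤ (OPT ++ REQ).count c := by
  induction cs with
  | nil =>
    intro OPT REQ
    simp [clScan]
  | cons c rest ih =>
    intro OPT REQ
    by_cases hmem : c ∈ OPT ++ REQ
    · by_cases hopt : c ∈ OPT
      · rw [clScan, if_pos hmem, if_pos hopt, ih]
        have hpos : 1 ≤ OPT.count c := List.one_le_count_iff.mpr hopt
        constructor
        all_goals
          intro h x
          have hx := h x
          have h1 : (OPT.erase c).count x = OPT.count x - if c = x then 1 else 0 := by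
            simpa using List.count_erase (a := x) (b := c) (l := OPT)
          by_cases hxc : x = c
          · subst hxc
            simp [List.count_append, h1] at hx ⊢
            omega
          · rw [if_neg (Ne.symm hxc)] at h1
            simp [Ne.symm hxc, List.count_append, h1] at hx ⊢
            omega
      · have hreq : c ∈ REQ := by
          rcases List.mem_append.mp hmem with h | h
          · exact absurd h hopt
          · exact h
        rw [clScan, if_pos hmem, if_neg hopt, ih]
        have hpos : 1 ≤ REQ.count c := List.one_le_count_iff.mpr hreq
        constructor
        all_goals
          intro h x
          have hx := h x
          have h1 : (REQ.erase c).count x = REQ.count x - if c = x then 1 else 0 := by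
            simpa using List.count_erase (a := x) (b := c) (l := REQ)
          by_cases hxc : x = c
          · subst hxc
            simp [List.count_append, h1] at hx ⊢
            omega
          · rw [if_neg (Ne.symm hxc)] at h1
            simp [Ne.symm hxc, List.count_append, h1] at hx ⊢
            omega
    · rw [clScan, if_neg hmem]
      constructor
      · intro h; cases h
      · intro h
        have hc := h c
        rw [List.count_eq_zero.mpr hmem] at hc
        simp [List.count_cons_self] at hc

-- B's aggregate check, unfolded to the same universally quantified count bound.
theorem alt_all_iff (s allowed : List Char) :
    ((PySem.Set.ofList s).all (fun c => decide (s.count c ≤ allowed.count c)) = true)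
      ↔ ∀ c, s.count c ≤ allowed.count c := by
  rw [List.all_eq_true]
  constructor
  · intro h c
    by_cases hc : c ∈ s
    · simpa using h c ((PySem.Set.mem_ofList s c).mpr hc)
    · simp [List.count_eq_zero.mpr hc]
  · intro h c _
    simpa using h c

-- ===== VERDICT (by name: the statement is the Claim_ definition above) =====
theorem check_letters_spec : Claim_equal_check_letters := by
  intro string _
  unfold Spec_check_letters check_letters check_letters_alt
  simp only []
  set s := (PySem.Str.strip string).toList with hs
  by_cases hlen : s.length < 4
  · simp [hlen]
  · simp only [hlen, if_false]
    by_cases hl : 'l' ∈ s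
    · simp only [hl, not_true, if_false, if_true]
      have key : clScan s "baumcane".toList ['l'] =
          (PySem.Set.ofList s).all
            (fun c => decide (s.count c ≤ ("baumcane".toList ++ "l".toList).count c)) := by
        have e : "l".toList = ['l'] := by decide
        rw [Bool.eq_iff_iff, clScan_iff, alt_all_iff]
        simp only [e]
      rw [key]
      cases hb : (PySem.Set.ofList s).all
          (fun c => decide (s.count c ≤ ("baumcane".toList ++ "l".toList).count c)) <;> simp
    · simp only [hl]
      cases hsc : clScan s "baumcane".toList ['l'] <;> simp
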